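-- pv_equiv track=rewrite | github.com/pypi-data/pypi-mirror-334 | packages/PowerDB/powerdb-2.1.2.tar.gz/powerdb-2.1.2/src/PowerDB/PowerDB.py | modify_line_containing_word
-- ===== SOURCE A (Python) =====
-- def modify_line_containing_word(text, word, new_line_content):
--     lines = text.splitlines()
--     line_number = -1  # Initialize to -1 to indicate word not found yet
--
--     for i, line in enumerate(lines):
--         if word in line:
--             line_number = i
--
--     if line_number != -1:
--         lines[line_number] = new_line_content
--         return "\n".join(lines)  # Rejoin the lines with newline characters
--     else:
--         return text  # Return original text if word not found
-- ===== SOURCE B (Python) =====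
-- def modify_line_containing_word(text, word, new_line_content):
--     lines = text.splitlines()
--     out = []
--     replaced = False
--     for line in reversed(lines):
--         if not replaced and word in line:
--             out.append(new_line_content)
--             replaced = True
--         else:
--             out.append(line)
--     if replaced:
--         return "\n".join(reversed(out))
--     return text
-- ===== Notes on version B (the rewrite author's own statement) =====
-- stated objective: alternative
-- what changed: B makes a single reverse pass that builds the output list directly, replacing the first match it meets (= A's last match) and never tracking or mutating an index, instead of A's full enumerate scan recording the last matching index followed by an in-place assignment.
import Mathlib
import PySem

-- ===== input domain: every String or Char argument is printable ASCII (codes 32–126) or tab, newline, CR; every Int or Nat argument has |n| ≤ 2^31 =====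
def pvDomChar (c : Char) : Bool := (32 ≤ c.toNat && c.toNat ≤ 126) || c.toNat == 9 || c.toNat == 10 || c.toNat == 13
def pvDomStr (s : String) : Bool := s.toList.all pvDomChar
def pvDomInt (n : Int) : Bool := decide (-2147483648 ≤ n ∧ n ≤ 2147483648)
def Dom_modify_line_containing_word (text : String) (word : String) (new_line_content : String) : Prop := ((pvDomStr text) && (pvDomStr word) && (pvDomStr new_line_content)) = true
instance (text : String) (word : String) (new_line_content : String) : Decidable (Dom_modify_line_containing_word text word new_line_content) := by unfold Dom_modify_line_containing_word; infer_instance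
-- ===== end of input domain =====

-- B replaces A's full enumerate-scan-then-index-assignment by a single reverse pass that
-- builds the output list directly, replacing the first match it meets (= A's last match);
-- same cost, different decomposition (objective: alternative).


-- ===== PORT A =====
-- A's loop body: record the index of every line containing word (the last one wins)
def pvStepA (word : String) (acc : Int) (p : Int × String) : Int :=
  if PySem.Str.isIn word p.2 then p.1 else acc

def modify_line_containing_word (text : String) (word : String) (new_line_content : String) : String :=
  let lines := PySem.Str.splitlines text
  let line_number := (PySem.List.enumerate lines 0).foldl (pvStepA word) (-1)
  if line_number ≠ -1 then
    -- lines[line_number] = new_line_content: the index comes from enumerate, hence in range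
    PySem.Str.join "\n" (PySem.List.pySetD lines line_number new_line_content)
  else text

-- ===== PORT B =====
-- B's loop body over reversed(lines): append new_line_content at the first match, the line otherwise
def pvStepB (word new_line_content : String) (s : List String × Bool) (line : String) : List String × Bool :=
  if !s.2 && PySem.Str.isIn word line then (s.1 ++ [new_line_content], true) else (s.1 ++ [line], s.2)

def modify_line_containing_word_alt (text : String) (word : String) (new_line_content : String) : String :=
  let lines := PySem.Str.splitlines text
  let r := lines.reverse.foldl (pvStepB word new_line_content) ([], false)
  if r.2 then PySem.Str.join "\n" r.1.reverse else text

-- ===== PRECONDITION & SPEC =====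
def Spec_modify_line_containing_word (text : String) (word : String) (new_line_content : String) (out : String) : Prop := out = modify_line_containing_word_alt text word new_line_content
instance (text : String) (word : String) (new_line_content : String) (out : String) : Decidable (Spec_modify_line_containing_word text word new_line_content out) := by unfold Spec_modify_line_containing_word; infer_instance

-- ===== CLAIM (what is proved, stated in full; the proofs are below) =====
def Claim_equal_modify_line_containing_word : Prop := ∀ (text : String) (word : String) (new_line_content : String), Dom_modify_line_containing_word text word new_line_content → Spec_modify_line_containing_word text word new_line_content (modify_line_containing_word text word new_line_content)

-- ===== LEMMAS AND PROOFS =====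

-- once replaced, B's pass just copies the remaining lines
theorem foldB_true (word new : String) (ls out : List String) :
    ls.foldl (pvStepB word new) (out, true) = (out ++ ls, true) := by
  induction ls generalizing out with
  | nil => simp
  | cons l ls ih =>
    simp only [List.foldl_cons, pvStepB, Bool.not_true, Bool.false_and, Bool.false_eq_true,
      ite_false]
    rw [ih]
    simp

-- B's pass from an arbitrary not-yet-replaced state shifts the empty-start result
theorem foldB_shift (word new : String) (ls out : List String) :
    ls.foldl (pvStepB word new) (out, false) =
      (out ++ (ls.foldl (pvStepB word new) ([], false)).1,
       (ls.foldl (pvStepB word new) ([], false)).2) := by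
  induction ls generalizing out with
  | nil => simp
  | cons l ls ih =>
    simp only [List.foldl_cons]
    by_cases hC : PySem.Chars.isIn word.toList l.toList = true
    · have hs : ∀ o : List String, pvStepB word new (o, false) l = (o ++ [new], true) := by
        intro o; simp [pvStepB, hC]
      rw [hs, hs, foldB_true, foldB_true]
      simp
    · have hC' : PySem.Chars.isIn word.toList l.toList = false := by
        simpa using hC
      have hs : ∀ o : List String, pvStepB word new (o, false) l = (o ++ [l], false) := by
        intro o; simp [pvStepB, hC']
      rw [hs, hs, ih (out ++ [l]), ih ([] ++ [l])]
      simp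

-- the correspondence between A's last-match index and B's reverse-pass state
theorem main_lemma (word new : String) (lines : List String) :
    ((PySem.List.enumerate lines 0).foldl (pvStepA word) (-1) = -1 ∧
      lines.reverse.foldl (pvStepB word new) ([], false) = (lines.reverse, false)) ∨
    (∃ n : Nat, n < lines.length ∧
      (PySem.List.enumerate lines 0).foldl (pvStepA word) (-1) = (n : Int) ∧
      (lines.reverse.foldl (pvStepB word new) ([], false)).2 = true ∧
      (lines.reverse.foldl (pvStepB word new) ([], false)).1.reverse = lines.set n new) := by
  induction lines using List.reverseRecOn with
  | nil => left; simp [PySem.List.enumerate]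
  | append_singleton xs x ih =>
    have hen : (PySem.List.enumerate (xs ++ [x]) 0).foldl (pvStepA word) (-1) =
        pvStepA word ((PySem.List.enumerate xs 0).foldl (pvStepA word) (-1)) ((xs.length : Int), x) := by
      rw [PySem.List.enumerate_append]
      simp [PySem.List.enumerate]
    have hrev0 : (xs ++ [x]).reverse.foldl (pvStepB word new) ([], false) =
        xs.reverse.foldl (pvStepB word new) (pvStepB word new ([], false) x) := by
      rw [List.reverse_append]
      rfl
    by_cases hC : PySem.Chars.isIn word.toList x.toList = true
    · right
      have hstep : pvStepB word new (([] : List String), false) x = ([new], true) := by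
        simp [pvStepB, hC]
      have hb : (xs ++ [x]).reverse.foldl (pvStepB word new) ([], false) =
          ([new] ++ xs.reverse, true) := by
        rw [hrev0, hstep, foldB_true]
      refine ⟨xs.length, by simp, ?_, ?_, ?_⟩
      · rw [hen]; simp [pvStepA, hC]
      · rw [hb]
      · rw [hb]
        simp
    · have hC' : PySem.Chars.isIn word.toList x.toList = false := by simpa using hC
      have hstepA : ∀ a : Int, pvStepA word a ((xs.length : Int), x) = a := by
        intro a; simp [pvStepA, hC']
      have hstepB : pvStepB word new (([] : List String), false) x = ([x], false) := by
        simp [pvStepB, hC']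
      have hrev : (xs ++ [x]).reverse.foldl (pvStepB word new) ([], false) =
          ([x] ++ (xs.reverse.foldl (pvStepB word new) ([], false)).1,
           (xs.reverse.foldl (pvStepB word new) ([], false)).2) := by
        rw [hrev0, hstepB, foldB_shift]
      rcases ih with ⟨ha, hb⟩ | ⟨n, hn, ha, hb2, hb1⟩
      · left
        constructor
        · rw [hen, hstepA, ha]
        · rw [hrev, hb]
          simp
      · right
        refine ⟨n, by simp; omega, ?_, ?_, ?_⟩
        · rw [hen, hstepA, ha]
        · rw [hrev]; exact hb2
        · rw [hrev, List.reverse_append, hb1, List.set_append]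
          simp [hn]

-- ===== VERDICT (by name: the statement is the Claim_ definition above) =====
theorem modify_line_containing_word_spec : Claim_equal_modify_line_containing_word := by
  intro text word new _
  unfold Spec_modify_line_containing_word modify_line_containing_word modify_line_containing_word_alt
  rcases main_lemma word new (PySem.Str.splitlines text) with ⟨ha, hb⟩ | ⟨n, hn, ha, hb2, hb1⟩
  · simp only [ha, hb, ne_eq, not_true_eq_false, ite_false, Bool.false_eq_true]
  · have hne : ((n : Int) ≠ -1) := by omega
    simp only [ha, hb2, hne, ne_eq, not_false_iff, if_pos]
    rw [hb1, PySem.List.pySetD_natCast]
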